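-- pv_equiv track=rewrite | github.com/globalise-huygens/documents | data/extract_archival_hierarchy.py | normalize_id
-- ===== SOURCE A (Python) =====
-- def normalize_id(s: str) -> str:
--     """
--     Normalize an identifier so that it can be used in a URI.
--
--     This function replaces white spaces, apostrophes, slashes
--     and colons with a dash. It also removes all non-alphanumeric
--     characters except for a dot and a dash.
--
--     Args:
--         s (str): Identifier to normalize.
--
--     Returns:
--         str: Normalized identifier.
--
--     >>> normalize_id("7.27A, 7.37A")
--     '7.27A-7.37A'
--     """
--     s = s.replace(" ", "-")
--     s = s.replace("'", "-")
--     s = s.replace("/", "-")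
--     s = s.replace(":", "-")
--
--     s = "".join([c for c in s if c.isalnum() or c in "-."])
--
--     while "--" in s:
--         s = s.replace("--", "-")
--
--     return s
-- ===== SOURCE B (Python) =====
-- def normalize_id(s: str) -> str:
--     out = []
--     last_dash = False
--     for c in s:
--         if c in " '/:-":
--             if not last_dash:
--                 out.append('-')
--                 last_dash = True
--         elif c.isalnum() or c == '.':
--             out.append(c)
--             last_dash = False
--     return "".join(out)
-- ===== Notes on version B (the rewrite author's own statement) =====
-- stated objective: simpler
-- what changed: Replaced A's four sequential character-replace passes, a filter pass and a repeated double-dash collapse loop by one single pass that appends a dash for dash-class characters only when the previously appended character is not a dash, keeps alphanumerics and dots, and drops everything else.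
import Mathlib
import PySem

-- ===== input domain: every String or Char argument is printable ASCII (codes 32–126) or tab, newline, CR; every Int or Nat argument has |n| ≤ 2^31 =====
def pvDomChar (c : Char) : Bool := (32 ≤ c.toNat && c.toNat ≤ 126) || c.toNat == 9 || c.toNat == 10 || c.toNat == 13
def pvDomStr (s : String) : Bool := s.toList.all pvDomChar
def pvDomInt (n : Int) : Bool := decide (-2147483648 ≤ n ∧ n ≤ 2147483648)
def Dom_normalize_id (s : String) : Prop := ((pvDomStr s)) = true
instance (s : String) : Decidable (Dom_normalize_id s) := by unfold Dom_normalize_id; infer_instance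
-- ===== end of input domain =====

-- B replaces A's four replace passes, filter pass and repeated "--"-collapse loop by one
-- single pass over the characters with a last-appended-was-dash flag (objective: simpler).

-- ===== PORT A =====
-- A-side helpers: pvDD models one pass of s.replace("--", "-"); the lemmas up to
-- pvDD_length_lt justify termination of the `while "--" in s` loop (cited in decreasing_by).
def pvDD : List Char → List Char
  | [] => []
  | '-' :: '-' :: t => '-' :: pvDD t
  | c :: t => c :: pvDD t

theorem pvDD_cons (c : Char) (t : List Char) (h : ∀ t', c = '-' → t = '-' :: t' → False) :
    pvDD (c :: t) = c :: pvDD t := by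
  rw [pvDD.eq_def]
  split <;> simp_all

theorem pv_go_dd (fuel : Nat) : ∀ (l acc : List Char), l.length ≤ fuel →
    PySem.Chars.replace.go ['-', '-'] ['-'] fuel l acc = acc.reverse ++ pvDD l := by
  induction fuel with
  | zero =>
    intro l acc h
    have : l = [] := by cases l <;> simp_all
    subst this; simp [PySem.Chars.replace.go, pvDD]
  | succ n ih =>
    intro l acc h
    match l with
    | [] => simp [PySem.Chars.replace.go, pvDD]
    | c :: t =>
      by_cases hp : ['-', '-'].isPrefixOf (c :: t)
      · obtain ⟨c2, t', rfl⟩ : ∃ c2 t', t = c2 :: t' := by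
          cases t with
          | nil => simp [List.isPrefixOf] at hp
          | cons a b => exact ⟨a, b, rfl⟩
        obtain ⟨rfl, rfl⟩ : '-' = c ∧ '-' = c2 := by simpa [List.isPrefixOf] using hp
        rw [PySem.Chars.replace.go]
        simp only [hp, if_true]
        show PySem.Chars.replace.go ['-', '-'] ['-'] n t' ('-' :: acc) = _
        rw [ih t' ('-' :: acc) (by simp at h ⊢; omega)]
        simp [pvDD]
      · rw [PySem.Chars.replace.go]
        simp only [hp, if_false, Bool.false_eq_true]
        rw [ih t (c :: acc) (by simp at h ⊢; omega)]
        rw [pvDD_cons c t (by intro t' hc ht; exact hp (by simp [hc, ht, List.isPrefixOf]))]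
        simp

theorem pv_replace_dd (l : List Char) :
    PySem.Chars.replace l ['-', '-'] ['-'] = pvDD l := by
  rw [PySem.Chars.replace]
  simp [pv_go_dd l.length l [] le_rfl]

theorem pvDD_length_le (l : List Char) : (pvDD l).length ≤ l.length := by
  induction l using pvDD.induct <;> simp [pvDD] <;> omega

theorem pvDD_length_lt (l : List Char) (h : ['-', '-'] <:+: l) :
    (pvDD l).length < l.length := by
  induction l using pvDD.induct with
  | case1 => simp at h
  | case2 t ih => have := pvDD_length_le t; simp [pvDD]; omega
  | case3 c t hne ih =>
    have ht : ['-', '-'] <:+: t := by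
      rcases List.infix_cons_iff.mp h with hpre | hinf
      · rcases hpre with ⟨r, hr⟩
        cases t with
        | nil => simp at hr
        | cons c2 t'' =>
          simp at hr
          exact absurd (hne t'' hr.1.symm (by simp [hr.2.1.symm])) (fun f => f)
      · exact hinf
    rw [pvDD_cons c t hne]
    have := ih ht
    simp; omega

-- the `while "--" in s: s = s.replace("--", "-")` loop of A
def normalize_id_collapse (s : String) : String :=
  if PySem.Str.isIn "--" s then
    normalize_id_collapse (PySem.Str.replace s "--" "-")
  else
    s
termination_by s.toList.length
decreasing_by
  rename_i h
  rw [PySem.Str.toList_replace]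
  have hinf : ['-', '-'] <:+: s.toList := by
    have := (PySem.Str.isIn_iff_infix "--" s).mp h
    simpa using this
  calc (PySem.Chars.replace s.toList ("--").toList ("-").toList).length
      = (pvDD s.toList).length := by rw [show ("--" : String).toList = ['-','-'] from rfl,
                                        show ("-" : String).toList = ['-'] from rfl, pv_replace_dd]
    _ < s.toList.length := pvDD_length_lt _ hinf

def normalize_id (s : String) : String :=
  let s1 := PySem.Str.replace s " " "-"
  let s2 := PySem.Str.replace s1 "'" "-"
  let s3 := PySem.Str.replace s2 "/" "-"
  let s4 := PySem.Str.replace s3 ":" "-"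
  let s5 := PySem.Str.join ""
    ((s4.toList.filter (fun c => PySem.Chars.isalnum c || PySem.Chars.isIn [c] ['-', '.'])).map
      (fun c => String.ofList [c]))
  normalize_id_collapse s5

-- ===== PORT B =====
def normalize_id_alt (s : String) : String :=
  let step := fun (st : List Char × Bool) (c : Char) =>
    if PySem.Chars.isIn [c] [' ', '\'', '/', ':', '-'] then
      (if st.2 then st else (st.1 ++ ['-'], true))
    else if PySem.Chars.isalnum c || c = '.' then
      (st.1 ++ [c], false)
    else
      st
  PySem.Str.join "" (((s.toList.foldl step ([], false)).1).map (fun c => String.ofList [c]))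

-- ===== PRECONDITION & SPEC =====
def Spec_normalize_id (s : String) (out : String) : Prop := out = normalize_id_alt s
instance (s : String) (out : String) : Decidable (Spec_normalize_id s out) := by unfold Spec_normalize_id; infer_instance

-- ===== CLAIM (what is proved, stated in full; the proofs are below) =====
def Claim_equal_normalize_id : Prop := ∀ (s : String), Dom_normalize_id s → Spec_normalize_id s (normalize_id s)

-- ===== LEMMAS AND PROOFS =====

-- proof-side model of the dash-run squash (flag = "last emitted char was a dash")
def pvGoS (flag : Bool) : List Char → List Char
  | [] => []
  | c :: t =>
    if c = '-' then (if flag then pvGoS true t else '-' :: pvGoS true t)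
    else c :: pvGoS false t

theorem pvGoS_dd (l : List Char) : ∀ flag, pvGoS flag (pvDD l) = pvGoS flag l := by
  induction l using pvDD.induct with
  | case1 => intro flag; rfl
  | case2 t ih =>
    intro flag
    simp only [pvDD, pvGoS]
    cases flag <;> simp [ih]
  | case3 c t hne ih =>
    intro flag
    rw [pvDD_cons c t hne]
    by_cases hc : c = '-'
    · subst hc
      cases flag <;> simp [pvGoS, ih]
    · simp [pvGoS, hc, ih]

theorem pvGoS_noDD (l : List Char) (h : ¬ (['-', '-'] <:+: l)) :
    ∀ flag, (flag = true → l.head? ≠ some '-') → pvGoS flag l = l := by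
  induction l with
  | nil => intro flag _; rfl
  | cons c t ih =>
    intro flag hf
    have hti : ¬ (['-', '-'] <:+: t) := fun hx => h (List.infix_cons_iff.mpr (Or.inr hx))
    by_cases hc : c = '-'
    · subst hc
      have hflag : flag = false := by
        cases flag
        · rfl
        · exact ((by simpa using hf rfl : False)).elim
      subst hflag
      have hth : t.head? ≠ some '-' := by
        intro hh
        cases t with
        | nil => simp at hh
        | cons c2 t' =>
          simp at hh
          exact h (List.infix_cons_iff.mpr (Or.inl ⟨t', by simp [hh]⟩))
      simp [pvGoS, ih hti true (fun _ => hth)]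
    · simp [pvGoS, hc, ih hti false (by simp)]

theorem pv_collapse_toList (s : String) :
    (normalize_id_collapse s).toList = pvGoS false s.toList := by
  rw [normalize_id_collapse]
  split
  · rename_i h
    rw [pv_collapse_toList (PySem.Str.replace s "--" "-")]
    rw [PySem.Str.toList_replace]
    rw [show ("--" : String).toList = ['-','-'] from rfl, show ("-" : String).toList = ['-'] from rfl,
       pv_replace_dd, pvGoS_dd]
  · rename_i h
    have hni : ¬ (['-', '-'] <:+: s.toList) := by
      have := (PySem.Str.isIn_iff_infix "--" s)
      simp at this
      intro hx
      exact h (by simp [this, hx])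
    exact (pvGoS_noDD s.toList hni false (by simp)).symm
termination_by s.toList.length
decreasing_by
  rename_i h
  rw [PySem.Str.toList_replace]
  have hinf : ['-', '-'] <:+: s.toList := by
    have := (PySem.Str.isIn_iff_infix "--" s).mp h
    simpa using this
  calc (PySem.Chars.replace s.toList ("--").toList ("-").toList).length
      = (pvDD s.toList).length := by rw [show ("--" : String).toList = ['-','-'] from rfl,
                                        show ("-" : String).toList = ['-'] from rfl, pv_replace_dd]
    _ < s.toList.length := pvDD_length_lt _ hinf

theorem pv_go_single (x : Char) (fuel : Nat) : ∀ (l acc : List Char), l.length ≤ fuel →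
    PySem.Chars.replace.go [x] ['-'] fuel l acc =
      acc.reverse ++ l.map (fun c => if c = x then '-' else c) := by
  induction fuel with
  | zero =>
    intro l acc h
    have : l = [] := by cases l <;> simp_all
    subst this; simp [PySem.Chars.replace.go]
  | succ n ih =>
    intro l acc h
    match l with
    | [] => simp [PySem.Chars.replace.go]
    | c :: t =>
      rw [PySem.Chars.replace.go]
      by_cases hp : [x].isPrefixOf (c :: t)
      · have hc : c = x := (by simpa [List.isPrefixOf] using hp : x = c).symm
        simp only [hp, if_true]
        show PySem.Chars.replace.go [x] ['-'] n t ('-' :: acc) = _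
        rw [ih t ('-' :: acc) (by simp at h ⊢; omega)]
        simp [hc]
      · have hc : ¬ c = x := fun hh => (by simpa [List.isPrefixOf] using hp : ¬ x = c) hh.symm
        simp only [hp, if_false, Bool.false_eq_true]
        rw [ih t (c :: acc) (by simp at h ⊢; omega)]
        simp [hc]

theorem pv_replace_single (x : Char) (l : List Char) :
    PySem.Chars.replace l [x] ['-'] = l.map (fun c => if c = x then '-' else c) := by
  rw [PySem.Chars.replace]
  simp [pv_go_single x l.length l [] le_rfl]

-- proof-side model of B's single pass
def pvGoB (flag : Bool) : List Char → List Char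
  | [] => []
  | c :: t =>
    if PySem.Chars.isIn [c] [' ', '\'', '/', ':', '-'] then
      (if flag then pvGoB true t else '-' :: pvGoB true t)
    else if PySem.Chars.isalnum c || c = '.' then
      c :: pvGoB false t
    else
      pvGoB flag t

theorem pv_foldl_inv (cs : List Char) : ∀ (out : List Char) (flag : Bool),
    (cs.foldl (fun (st : List Char × Bool) (c : Char) =>
      if PySem.Chars.isIn [c] [' ', '\'', '/', ':', '-'] then
        (if st.2 then st else (st.1 ++ ['-'], true))
      else if PySem.Chars.isalnum c || c = '.' then (st.1 ++ [c], false)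
      else st) (out, flag)).1 = out ++ pvGoB flag cs := by
  induction cs with
  | nil => intro out flag; simp [pvGoB]
  | cons c t ih =>
    intro out flag
    rw [List.foldl_cons]
    by_cases h1 : PySem.Chars.isIn [c] [' ', '\'', '/', ':', '-']
    · cases flag
      · simp only [h1, if_true, Bool.false_eq_true, if_false]
        rw [ih (out ++ ['-']) true]
        simp [pvGoB, h1]
      · simp only [h1, if_true]
        rw [ih out true]
        simp [pvGoB, h1]
    · by_cases h2 : PySem.Chars.isalnum c || c = '.'
      · simp only [h1, Bool.false_eq_true, if_false, h2, if_true]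
        rw [ih (out ++ [c]) false]
        simp [pvGoB, h1, h2]
      · simp only [h1, h2, Bool.false_eq_true, if_false]
        rw [ih out flag]
        simp [pvGoB, h1, h2]

theorem pv_isIn_mem (c : Char) (L : List Char) :
    PySem.Chars.isIn [c] L = true ↔ c ∈ L := by
  rw [PySem.Chars.isIn_iff_infix]
  exact List.singleton_infix_iff c L

theorem pvGoB_eq_goS (cs : List Char) : ∀ flag,
    pvGoB flag cs = pvGoS flag
      (((((cs.map (fun c => if c = ' ' then '-' else c)).map
          (fun c => if c = '\'' then '-' else c)).map
          (fun c => if c = '/' then '-' else c)).map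
          (fun c => if c = ':' then '-' else c)).filter
        (fun c => PySem.Chars.isalnum c || PySem.Chars.isIn [c] ['-', '.'])) := by
  induction cs with
  | nil => intro flag; rfl
  | cons c t ih =>
    intro flag
    simp only [List.map_cons, List.filter_cons]
    by_cases h1 : PySem.Chars.isIn [c] [' ', '\'', '/', ':', '-']
    · have hm : c ∈ [' ', '\'', '/', ':', '-'] := (pv_isIn_mem c _).mp h1
      have hf4 : (if (if (if (if c = ' ' then '-' else c) = '\'' then '-'
          else (if c = ' ' then '-' else c)) = '/' then '-'
          else (if (if c = ' ' then '-' else c) = '\'' then '-'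
          else (if c = ' ' then '-' else c))) = ':' then '-'
          else (if (if (if c = ' ' then '-' else c) = '\'' then '-'
          else (if c = ' ' then '-' else c)) = '/' then '-'
          else (if (if c = ' ' then '-' else c) = '\'' then '-'
          else (if c = ' ' then '-' else c)))) = '-' := by
        simp only [List.mem_cons, List.not_mem_nil, or_false] at hm
        rcases hm with rfl | rfl | rfl | rfl | rfl <;> decide
      rw [hf4]
      have hkeep : (PySem.Chars.isalnum '-' || PySem.Chars.isIn ['-'] ['-', '.']) = true := by decide
      rw [if_pos hkeep]
      simp only [pvGoB, pvGoS, h1, if_true]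
      cases flag <;> simp [ih]
    · have hm : c ∉ [' ', '\'', '/', ':', '-'] := fun hx => by
        simp [pv_isIn_mem c [' ', '\'', '/', ':', '-'], hx] at h1
      simp only [List.mem_cons, not_or] at hm
      obtain ⟨h₁, h₂, h₃, h₄, h₅, -⟩ := hm
      rw [if_neg h₁, if_neg h₂, if_neg h₃, if_neg h₄]
      have hkeepIn : PySem.Chars.isIn [c] ['-', '.'] = decide (c = '.') := by
        by_cases hc : c = '.'
        · subst hc; decide
        · have hnm : c ∉ ['-', '.'] := by simp [h₅, hc]
          simp only [hc, decide_false]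
          exact Bool.eq_false_iff.mpr (fun hx => hnm ((pv_isIn_mem _ _).mp hx))
      by_cases h2 : PySem.Chars.isalnum c || c = '.'
      · have : (PySem.Chars.isalnum c || PySem.Chars.isIn [c] ['-', '.']) = true := by
          rw [hkeepIn]; simpa using h2
        rw [if_pos this]
        simp [pvGoB, pvGoS, h1, h2, h₅, ih]
      · have : ¬ ((PySem.Chars.isalnum c || PySem.Chars.isIn [c] ['-', '.']) = true) := by
          rw [hkeepIn]
          simpa using h2
        rw [if_neg this]
        simp only [pvGoB, h1, Bool.false_eq_true, if_false, h2]
        exact ih flag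

theorem pv_alt_toList (s : String) : (normalize_id_alt s).toList = [] ++ pvGoB false s.toList := by
  show (PySem.Str.join "" (((s.toList.foldl (fun (st : List Char × Bool) (c : Char) =>
      if PySem.Chars.isIn [c] [' ', '\'', '/', ':', '-'] then
        (if st.2 then st else (st.1 ++ ['-'], true))
      else if PySem.Chars.isalnum c || c = '.' then
        (st.1 ++ [c], false)
      else
        st) ([], false)).1).map (fun c => String.ofList [c]))).toList = _
  rw [PySem.Str.toList_join, List.map_map]
  simp only [Function.comp_def, String.toList_ofList]
  rw [show ("" : String).toList = [] from rfl, PySem.Chars.join_nil_singletons]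
  exact pv_foldl_inv s.toList [] false

-- ===== VERDICT (by name: the statement is the Claim_ definition above) =====
theorem normalize_id_spec : Claim_equal_normalize_id := by
  intro s _
  unfold Spec_normalize_id
  apply String.toList_inj.mp
  show (normalize_id_collapse _).toList = _
  rw [pv_collapse_toList]
  rw [PySem.Str.toList_join]
  rw [List.map_map]
  simp only [Function.comp_def, String.toList_ofList]
  rw [show ("" : String).toList = [] from rfl, PySem.Chars.join_nil_singletons]
  rw [pv_alt_toList, List.nil_append]
  rw [pvGoB_eq_goS s.toList false]
  rw [PySem.Str.toList_replace, PySem.Str.toList_replace, PySem.Str.toList_replace,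
      PySem.Str.toList_replace]
  rw [show (" " : String).toList = [' '] from rfl, show ("'" : String).toList = ['\''] from rfl,
      show ("/" : String).toList = ['/'] from rfl, show (":" : String).toList = [':'] from rfl,
      show ("-" : String).toList = ['-'] from rfl]
  rw [pv_replace_single, pv_replace_single, pv_replace_single, pv_replace_single]
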